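-- pv_equiv track=rewrite | github.com/bg7nzl/proptracker-client | gridcodec/python/gridcodec/codec.py | _bitmap_to_entries
-- ===== SOURCE A (Python) =====
-- def _bit_get(buf, bit):
--     return (buf[bit >> 3] >> (bit & 7)) & 1
--
-- def _bitmap_to_entries(bitmap, n_active_lons, n_active_lats,
--                       active_lons, active_lats, lats_per_row):
--     out = []
--     for li in range(n_active_lons):
--         for ai in range(n_active_lats):
--             bit_idx = li * n_active_lats + ai
--             if _bit_get(bitmap, bit_idx):
--                 out.append(active_lons[li] * lats_per_row + active_lats[ai])
--     return out
-- ===== SOURCE B (Python) =====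
-- def _bitmap_to_entries(bitmap, n_active_lons, n_active_lats,
--                        active_lons, active_lats, lats_per_row):
--     if n_active_lons <= 0 or n_active_lats <= 0:
--         return []
--     total = n_active_lons * n_active_lats
--     out = []
--     for byte_index in range((total + 7) // 8):
--         byte = bitmap[byte_index]
--         for off in range(8):
--             if (byte >> off) & 1:
--                 bit_idx = 8 * byte_index + off
--                 if bit_idx < total:
--                     li, ai = divmod(bit_idx, n_active_lats)
--                     out.append(active_lons[li] * lats_per_row + active_lats[ai])
--     return out
-- ===== Notes on version B (the rewrite author's own statement) =====
-- stated objective: alternative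
-- what changed: B walks the packed bitmap byte by byte and derives the (lon,lat) coordinates of each set bit by divmod on the bit index, instead of enumerating every coordinate pair and testing its bit.
import Mathlib
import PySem

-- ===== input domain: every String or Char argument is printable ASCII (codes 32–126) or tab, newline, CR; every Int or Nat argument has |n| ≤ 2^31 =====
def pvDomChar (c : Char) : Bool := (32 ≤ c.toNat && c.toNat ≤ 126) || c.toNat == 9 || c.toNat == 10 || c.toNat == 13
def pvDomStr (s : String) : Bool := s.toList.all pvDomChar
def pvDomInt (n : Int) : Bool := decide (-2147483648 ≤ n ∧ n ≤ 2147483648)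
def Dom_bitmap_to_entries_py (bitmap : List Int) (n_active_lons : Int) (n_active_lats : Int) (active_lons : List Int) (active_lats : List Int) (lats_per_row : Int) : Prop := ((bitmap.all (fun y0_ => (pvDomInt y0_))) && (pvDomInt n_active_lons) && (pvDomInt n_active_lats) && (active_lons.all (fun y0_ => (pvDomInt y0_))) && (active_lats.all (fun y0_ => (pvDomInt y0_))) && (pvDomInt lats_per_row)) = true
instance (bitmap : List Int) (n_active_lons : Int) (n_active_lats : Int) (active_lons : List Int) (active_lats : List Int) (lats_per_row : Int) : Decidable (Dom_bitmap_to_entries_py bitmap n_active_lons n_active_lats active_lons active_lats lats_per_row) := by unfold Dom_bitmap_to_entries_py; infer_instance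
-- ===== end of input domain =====

-- B traverses the packed bitmap byte by byte and derives (lon, lat) coordinates from each
-- set bit index by divmod, instead of enumerating every coordinate pair and testing its bit
-- (objective: alternative algorithm, same asymptotic cost).

-- ===== PORT A =====
-- _bit_get(buf, bit): (buf[bit >> 3] >> (bit & 7)) & 1.
-- pyGetD default 0 is never reached inside Pre_ (byte index in range there);
-- '.toNat' on the shift amount is exact: band bit 7 is in 0..7 for the bit ≥ 0 A passes.
def pvBitGetA (buf : List Int) (bit : Int) : Int :=
  PySem.Int.band (PySem.List.pyGetD buf (bit >>> (3:Nat)) 0 >>> (PySem.Int.band bit 7).toNat) 1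

def bitmap_to_entries_py (bitmap : List Int) (n_active_lons : Int) (n_active_lats : Int) (active_lons : List Int) (active_lats : List Int) (lats_per_row : Int) : List Int :=
  (PySem.List.pyRange 0 n_active_lons 1).foldl (fun out li =>
    (PySem.List.pyRange 0 n_active_lats 1).foldl (fun out ai =>
      let bit_idx := li * n_active_lats + ai
      if pvBitGetA bitmap bit_idx ≠ 0 then
        out ++ [PySem.List.pyGetD active_lons li 0 * lats_per_row + PySem.List.pyGetD active_lats ai 0]
      else out) out) []

-- ===== PORT B =====
def bitmap_to_entries_py_alt (bitmap : List Int) (n_active_lons : Int) (n_active_lats : Int) (active_lons : List Int) (active_lats : List Int) (lats_per_row : Int) : List Int :=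
  if n_active_lons ≤ 0 ∨ n_active_lats ≤ 0 then []
  else
    let total := n_active_lons * n_active_lats
    (PySem.List.pyRange 0 (PySem.Int.floordiv (total + 7) 8) 1).foldl (fun out byte_index =>
      let byte := PySem.List.pyGetD bitmap byte_index 0
      (PySem.List.pyRange 0 8 1).foldl (fun out off =>
        if PySem.Int.band (byte >>> off.toNat) 1 ≠ 0 then
          let bit_idx := 8 * byte_index + off
          if bit_idx < total then
            out ++ [PySem.List.pyGetD active_lons (PySem.Int.floordiv bit_idx n_active_lats) 0 * lats_per_row
                    + PySem.List.pyGetD active_lats (PySem.Int.mod bit_idx n_active_lats) 0]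
          else out
        else out) out) []

-- ===== PRECONDITION & SPEC =====
-- Pre_ = exactly the inputs on which Python A returns: the bitmap has a byte for every grid
-- bit (else IndexError in _bit_get) and, for every SET grid bit, its lon/lat indices are in
-- range of active_lons/active_lats (else IndexError on the append line).
def pvBitPre (buf : List Int) (bit : Int) : Int :=
  PySem.Int.band (PySem.List.pyGetD buf (bit >>> (3:Nat)) 0 >>> (PySem.Int.band bit 7).toNat) 1

def Pre_bitmap_to_entries_py (bitmap : List Int) (n_active_lons : Int) (n_active_lats : Int) (active_lons : List Int) (active_lats : List Int) (lats_per_row : Int) : Prop :=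
  (0 < n_active_lons ∧ 0 < n_active_lats) →
    ((n_active_lons * n_active_lats).toNat ≤ 8 * bitmap.length ∧
     ∀ li ∈ PySem.List.pyRange 0 n_active_lons 1, ∀ ai ∈ PySem.List.pyRange 0 n_active_lats 1,
       pvBitPre bitmap (li * n_active_lats + ai) ≠ 0 →
         li < (active_lons.length : Int) ∧ ai < (active_lats.length : Int))
instance (bitmap : List Int) (n_active_lons : Int) (n_active_lats : Int) (active_lons : List Int) (active_lats : List Int) (lats_per_row : Int) : Decidable (Pre_bitmap_to_entries_py bitmap n_active_lons n_active_lats active_lons active_lats lats_per_row) := by unfold Pre_bitmap_to_entries_py; infer_instance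

def pvWitness_bitmap_to_entries_py : List Int × Int × Int × List Int × List Int × Int :=
  ([255], 2, 2, [10, 20], [1, 2], 100)

def Spec_bitmap_to_entries_py (bitmap : List Int) (n_active_lons : Int) (n_active_lats : Int) (active_lons : List Int) (active_lats : List Int) (lats_per_row : Int) (out : List Int) : Prop := out = bitmap_to_entries_py_alt bitmap n_active_lons n_active_lats active_lons active_lats lats_per_row
instance (bitmap : List Int) (n_active_lons : Int) (n_active_lats : Int) (active_lons : List Int) (active_lats : List Int) (lats_per_row : Int) (out : List Int) : Decidable (Spec_bitmap_to_entries_py bitmap n_active_lons n_active_lats active_lons active_lats lats_per_row out) := by unfold Spec_bitmap_to_entries_py; infer_instance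

-- ===== CLAIM (what is proved, stated in full; the proofs are below) =====
def Claim_equal_bitmap_to_entries_py : Prop := ∀ (bitmap : List Int) (n_active_lons : Int) (n_active_lats : Int) (active_lons : List Int) (active_lats : List Int) (lats_per_row : Int), Dom_bitmap_to_entries_py bitmap n_active_lons n_active_lats active_lons active_lats lats_per_row → Pre_bitmap_to_entries_py bitmap n_active_lons n_active_lats active_lons active_lats lats_per_row → Spec_bitmap_to_entries_py bitmap n_active_lons n_active_lats active_lons active_lats lats_per_row (bitmap_to_entries_py bitmap n_active_lons n_active_lats active_lons active_lats lats_per_row)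

-- ===== LEMMAS AND PROOFS =====

def pvEntry (lons lats : List Int) (lpr : Int) (M idx : Nat) : Int :=
  PySem.List.pyGetD lons (Nat.cast (idx / M)) 0 * lpr + PySem.List.pyGetD lats (Nat.cast (idx % M)) 0
def pvCanon (bm lons lats : List Int) (lpr : Int) (M T : Nat) : List Int :=
  (List.range T).flatMap (fun (idx : Nat) =>
    if pvBitGetA bm (idx : Int) ≠ 0 then [pvEntry lons lats lpr M idx] else [])
theorem pvFlatMap_congr_mem {α β : Type} {l : List α} {f g : α → List β}
    (h : ∀ x ∈ l, f x = g x) : l.flatMap f = l.flatMap g := by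
  induction l with
  | nil => rfl
  | cons a l ih =>
    simp only [List.flatMap_cons]
    rw [h a (by simp), ih (fun x hx => h x (by simp [hx]))]
theorem pvRange_mul_flatMap {β : Type} (N M : Nat) (F : Nat → List β) :
    (List.range (N * M)).flatMap F
      = (List.range N).flatMap (fun li => (List.range M).flatMap (fun ai => F (li * M + ai))) := by
  induction N with
  | zero => simp
  | succ n ih =>
    have h : (n + 1) * M = n * M + M := by ring
    rw [h, List.range_add, List.flatMap_append, ih, List.range_succ, List.flatMap_append]
    simp [List.flatMap_map]
theorem pvNested_foldl_flatMap {α β γ : Type} (l1 : List α) (l2 : List β)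
    (step : List γ → α → β → List γ) (body : α → β → List γ)
    (h : ∀ acc x y, step acc x y = acc ++ body x y) (init : List γ) :
    l1.foldl (fun acc x => l2.foldl (fun acc y => step acc x y) acc) init
      = init ++ l1.flatMap (fun x => l2.flatMap (body x)) := by
  induction l1 generalizing init with
  | nil => simp
  | cons a l ih =>
    simp only [List.foldl_cons, List.flatMap_cons]
    have hstep : (fun (acc : List γ) (y : β) => step acc a y) = fun acc y => acc ++ body a y := by
      funext acc y; exact h acc a y
    rw [hstep, PySem.List.foldl_append_eq_flatMap, ih, List.append_assoc]

theorem pvA_eq (bm lons lats : List Int) (lpr : Int) (N M : Nat) (hM : 0 < M) :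
    bitmap_to_entries_py bm (N : Int) (M : Int) lons lats lpr = pvCanon bm lons lats lpr M (N * M) := by
  unfold bitmap_to_entries_py pvCanon
  rw [PySem.List.pyRange_zero_nat, PySem.List.pyRange_zero_nat, List.foldl_map,
      pvRange_mul_flatMap]
  simp only [List.foldl_map]
  refine Eq.trans (pvNested_foldl_flatMap (List.range N) (List.range M) _
    (fun li ai => if pvBitGetA bm ((li : Int) * (M : Int) + (ai : Int)) ≠ 0 then
        [PySem.List.pyGetD lons ((li : Nat) : Int) 0 * lpr + PySem.List.pyGetD lats ((ai : Nat) : Int) 0]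
      else [])
    (fun acc li ai => by split <;> simp [*]) []) ?_
  rw [List.nil_append]
  refine pvFlatMap_congr_mem (fun li hli => pvFlatMap_congr_mem (fun ai hai => ?_))
  simp only [List.mem_range] at hli hai
  have hcast : ((li : Int) * (M : Int) + (ai : Int)) = ((li * M + ai : Nat) : Int) := by push_cast; ring
  have hdiv : (li * M + ai) / M = li := by
    rw [mul_comm, Nat.mul_add_div hM, Nat.div_eq_of_lt hai, Nat.add_zero]
  have hmod : (li * M + ai) % M = ai := by
    rw [mul_comm, Nat.mul_add_mod, Nat.mod_eq_of_lt hai]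
  rw [hcast]
  unfold pvEntry
  rw [hdiv, hmod]

theorem pvBit_nat (bm : List Int) (idx : Nat) :
    pvBitGetA bm (idx : Int)
      = PySem.Int.band (PySem.List.pyGetD bm (Nat.cast (idx / 8)) 0 >>> (idx % 8)) 1 := by
  unfold pvBitGetA
  have h1 : ((idx:Int) >>> (3:Nat)) = (Nat.cast (idx / 8) : Int) := by
    simp [Int.shiftRight_eq_div_pow]
  have h2 : (PySem.Int.band (idx:Int) 7).toNat = idx % 8 := by
    rw [show (7:Int) = ((7:Nat):Int) from by norm_num, PySem.Int.band_natCast, Int.toNat_natCast]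
    have := Nat.and_two_pow_sub_one_eq_mod idx 3
    norm_num at this; omega
  rw [h1, h2]

def pvH (bm lons lats : List Int) (lpr : Int) (M T idx : Nat) : List Int :=
  if PySem.Int.band (PySem.List.pyGetD bm (Nat.cast (idx / 8)) 0 >>> (idx % 8)) 1 ≠ 0 then
    (if idx < T then [pvEntry lons lats lpr M idx] else [])
  else []

theorem pvCanon_eq_H (bm lons lats : List Int) (lpr : Int) (M T R : Nat) (hTR : T ≤ R) :
    pvCanon bm lons lats lpr M T = (List.range R).flatMap (pvH bm lons lats lpr M T) := by
  rw [show R = T + (R - T) from by omega, List.range_add, List.flatMap_append]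
  have h2 : (List.map (fun x => T + x) (List.range (R - T))).flatMap (pvH bm lons lats lpr M T) = [] := by
    rw [List.flatMap_map]
    simp only [List.flatMap_eq_nil_iff, List.mem_range]
    intro x hx
    unfold pvH
    split
    · rw [if_neg (by omega)]
    · rfl
  rw [h2, List.append_nil]
  unfold pvCanon
  refine pvFlatMap_congr_mem (fun idx hidx => ?_)
  simp only [List.mem_range] at hidx
  rw [pvBit_nat]
  unfold pvH
  rw [if_pos hidx]

theorem pvNested_foldl_flatMap' {α β γ : Type} (l1 : List α) (l2 : List β)
    (step : List γ → α → β → List γ)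
    (h : ∀ acc x y, step acc x y = acc ++ step [] x y) (init : List γ) :
    l1.foldl (fun acc x => l2.foldl (fun acc y => step acc x y) acc) init
      = init ++ l1.flatMap (fun x => l2.flatMap (fun y => step [] x y)) :=
  pvNested_foldl_flatMap l1 l2 step (fun x y => step [] x y) h init

theorem pvB_eq (bm lons lats : List Int) (lpr : Int) (N M : Nat) (hN : 0 < N) (hM : 0 < M) :
    bitmap_to_entries_py_alt bm (N : Int) (M : Int) lons lats lpr = pvCanon bm lons lats lpr M (N * M) := by
  unfold bitmap_to_entries_py_alt
  rw [if_neg (by simp only [not_or, not_le]; exact ⟨by exact_mod_cast hN, by exact_mod_cast hM⟩)]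
  have h8 : PySem.Int.floordiv ((N:Int) * (M:Int) + 7) 8 = (((N*M+7)/8 : Nat) : Int) := by
    rw [show ((N:Int)*(M:Int)+7) = ((N*M+7 : Nat) : Int) from by push_cast; ring,
        show (8:Int) = ((8:Nat):Int) from by norm_num, PySem.Int.floordiv_natCast]
  have hr8 : PySem.List.pyRange 0 8 1 = (List.range 8).map (Nat.cast : Nat → Int) := by decide
  simp only [h8, hr8, PySem.List.pyRange_zero_nat, List.foldl_map]
  refine Eq.trans (pvNested_foldl_flatMap' (List.range ((N*M+7)/8)) (List.range 8)
    _ (fun acc bi off => by split_ifs <;> simp) []) ?_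
  rw [List.nil_append]
  rw [pvCanon_eq_H bm lons lats lpr M (N*M) (((N*M+7)/8) * 8) (by omega),
      pvRange_mul_flatMap]
  refine pvFlatMap_congr_mem (fun bi hbi => pvFlatMap_congr_mem (fun off hoff => ?_))
  simp only [List.mem_range] at hbi hoff
  unfold pvH pvEntry
  have hc : (8 * (bi:Int) + (off:Int)) = ((bi * 8 + off : Nat) : Int) := by push_cast; ring
  have hq : (bi * 8 + off) / 8 = bi := by omega
  have hr : (bi * 8 + off) % 8 = off := by omega
  rw [hc, hq, hr, Int.toNat_natCast]
  rw [show ((N:Int) * (M:Int)) = ((N*M : Nat) : Int) from by push_cast; ring,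
      PySem.Int.floordiv_natCast, PySem.Int.mod_natCast]
  simp only [Nat.cast_lt]
  simp only [Int.shiftRight_natCast_right]
  simp only [List.nil_append]

theorem pvFoldl_const {α β : Type} (l : List α) (init : β) :
    l.foldl (fun acc _ => acc) init = init := by
  induction l generalizing init with
  | nil => rfl
  | cons a l ih => exact ih init

-- ===== VERDICT (by name: the statement is the Claim_ definition above) =====
theorem bitmap_to_entries_py_spec : Claim_equal_bitmap_to_entries_py := by
  intro bm n m lons lats lpr _ _
  unfold Spec_bitmap_to_entries_py
  by_cases hn : n ≤ 0 ∨ m ≤ 0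
  · unfold bitmap_to_entries_py_alt
    rw [if_pos hn]
    unfold bitmap_to_entries_py
    rcases hn with h | h
    · rw [PySem.List.pyRange_one_eq_nil h]; rfl
    · have hin : PySem.List.pyRange 0 m 1 = [] := PySem.List.pyRange_one_eq_nil h
      simp only [hin, List.foldl_nil]
      exact pvFoldl_const _ _
  · have hn1 : 0 < n := by omega
    have hm1 : 0 < m := by omega
    lift n to ℕ using le_of_lt hn1 with N
    lift m to ℕ using le_of_lt hm1 with M
    rw [pvA_eq bm lons lats lpr N M (by exact_mod_cast hm1),
        pvB_eq bm lons lats lpr N M (by exact_mod_cast hn1) (by exact_mod_cast hm1)]
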